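-- pv_equiv track=rewrite | github.com/kyubin-l/minigame | main.py | find_options
-- ===== SOURCE A (Python) =====
-- import itertools
--
-- def find_options(target_sum, num_cells):
--     numbers = list(range(1, 10))
--     result = [seq for seq in itertools.combinations(numbers, num_cells)
--               if sum(seq) == target_sum]
--
--     temp = []
--     for option in result:
--         temp += list(option)
--
--     return set(temp), result
-- ===== SOURCE B (Python) =====
-- def _search(digits, k, remaining):
--     # choose k digits from `digits` (in order) summing to `remaining`
--     if k == 0:
--         return [[]] if remaining == 0 else []
--     if not digits:
--         return []
--     d, rest = digits[0], digits[1:]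
--     with_d = [[d] + seq for seq in _search(rest, k - 1, remaining - d)]
--     return with_d + _search(rest, k, remaining)
--
-- def find_options(target_sum, num_cells):
--     result = [tuple(seq) for seq in _search(list(range(1, 10)), num_cells, target_sum)]
--     used = {d for seq in result for d in seq}
--     return used, result
-- ===== Notes on version B (the rewrite author's own statement) =====
-- stated objective: alternative
-- what changed: Replaces generate-all-combinations-then-filter (itertools.combinations + sum check) by a recursive backtracking search that threads the remaining sum through the recursion, and builds the digit set by a set comprehension instead of a concatenation loop.
import Mathlib
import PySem

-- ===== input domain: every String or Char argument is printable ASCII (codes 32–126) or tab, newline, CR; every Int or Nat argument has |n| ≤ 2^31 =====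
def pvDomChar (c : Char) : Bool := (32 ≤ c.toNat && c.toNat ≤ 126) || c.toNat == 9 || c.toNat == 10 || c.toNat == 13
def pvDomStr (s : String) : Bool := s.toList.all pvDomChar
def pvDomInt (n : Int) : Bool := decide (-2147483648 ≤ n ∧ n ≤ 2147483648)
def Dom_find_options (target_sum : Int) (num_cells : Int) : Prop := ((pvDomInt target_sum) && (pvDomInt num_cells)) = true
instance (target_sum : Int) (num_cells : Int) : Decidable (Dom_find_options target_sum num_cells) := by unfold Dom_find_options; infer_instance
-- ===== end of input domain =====

-- B is an alternative of similar cost: recursive backtracking threading the remaining sum,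
-- instead of A's generate-all-combinations-then-filter.

-- ===== PORT A =====
-- itertools.combinations(l, k) for a list l, in lexicographic order (exact for this use)
def pvCombs (l : List Int) (k : Nat) : List (List Int) :=
  match k, l with
  | 0, _ => [[]]
  | _ + 1, [] => []
  | k + 1, x :: xs => (pvCombs xs k).map (fun s => x :: s) ++ pvCombs xs (k + 1)

def find_options (target_sum : Int) (num_cells : Int) : List Int × List (List Int) :=
  let numbers := PySem.List.pyRange 1 10 1
  let result := (pvCombs numbers num_cells.toNat).filter (fun seq => seq.sum == target_sum)
  let temp := result.foldl (fun acc option => acc ++ option) []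
  (PySem.Set.ofList temp, result)

-- ===== PORT B =====
-- _search(digits, k, remaining) from Source B
def pvSearch (digits : List Int) (k : Int) (remaining : Int) : List (List Int) :=
  if k == 0 then (if remaining == 0 then [[]] else [])
  else
    match digits with
    | [] => []
    | d :: rest =>
      ((pvSearch rest (k - 1) (remaining - d)).map (fun seq => d :: seq)) ++
        pvSearch rest k remaining

def find_options_alt (target_sum : Int) (num_cells : Int) : List Int × List (List Int) :=
  let result := pvSearch (PySem.List.pyRange 1 10 1) num_cells target_sum
  let used := PySem.Set.ofList (result.flatMap (fun seq => seq))
  (used, result)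

-- ===== PRECONDITION & SPEC =====
-- A raises ValueError for negative num_cells (itertools.combinations rejects negative r)
def Pre_find_options (target_sum : Int) (num_cells : Int) : Prop := 0 ≤ num_cells
instance (target_sum : Int) (num_cells : Int) : Decidable (Pre_find_options target_sum num_cells) := by unfold Pre_find_options; infer_instance
def pvWitness_find_options : Int × Int := (10, 3)

def Spec_find_options (target_sum : Int) (num_cells : Int) (out : List Int × List (List Int)) : Prop := out = find_options_alt target_sum num_cells
instance (target_sum : Int) (num_cells : Int) (out : List Int × List (List Int)) : Decidable (Spec_find_options target_sum num_cells out) := by unfold Spec_find_options; infer_instance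

-- ===== CLAIM (what is proved, stated in full; the proofs are below) =====
def Claim_equal_find_options : Prop := ∀ (target_sum : Int) (num_cells : Int), Dom_find_options target_sum num_cells → Pre_find_options target_sum num_cells → Spec_find_options target_sum num_cells (find_options target_sum num_cells)

-- ===== LEMMAS AND PROOFS =====

-- B's pruned search IS A's filter of combinations
set_option maxRecDepth 4000 in
theorem pvSearch_eq_filter (digits : List Int) :
    ∀ (k rem : Int), 0 ≤ k →
      pvSearch digits k rem = (pvCombs digits k.toNat).filter (fun s => s.sum == rem) := by
  induction digits with
  | nil =>
    intro k rem hk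
    unfold pvSearch
    rcases eq_or_lt_of_le hk with h | h
    · rw [← h]
      have h0 : ((0:Int) == rem) = (rem == 0) := by
        rw [Bool.eq_iff_iff]; simp only [beq_iff_eq]; omega
      by_cases hr : rem = 0 <;> simp [pvCombs, h0, hr]
    · have hk0 : k ≠ 0 := by omega
      have : k.toNat = (k.toNat - 1) + 1 := by omega
      rw [this]
      simp [hk0, pvCombs]
  | cons d rest ih =>
    intro k rem hk
    unfold pvSearch
    rcases eq_or_lt_of_le hk with h | h
    · rw [← h]
      have h0 : ((0:Int) == rem) = (rem == 0) := by
        rw [Bool.eq_iff_iff]; simp only [beq_iff_eq]; omega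
      by_cases hr : rem = 0 <;> simp [pvCombs, h0, hr]
    · have hk0 : k ≠ 0 := by omega
      have hnat : k.toNat = (k - 1).toNat + 1 := by omega
      rw [if_neg (by simp [hk0])]
      show ((pvSearch rest (k - 1) (rem - d)).map (fun seq => d :: seq)) ++
          pvSearch rest k rem = _
      rw [ih (k - 1) (rem - d) (by omega), ih k rem hk, hnat]
      simp only [pvCombs, List.filter_append, List.filter_map]
      have hfc : ∀ s ∈ pvCombs rest (k - 1).toNat,
          ((fun s : List Int => s.sum == rem) ∘ (fun s => d :: s)) s
            = (fun s : List Int => s.sum == rem - d) s := by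
        intro s _
        simp only [Function.comp_apply, List.sum_cons]
        rw [Bool.eq_iff_iff]
        simp only [beq_iff_eq]
        omega
      rw [List.filter_congr hfc]

theorem find_options_eq (target_sum num_cells : Int) (h : 0 ≤ num_cells) :
    find_options target_sum num_cells = find_options_alt target_sum num_cells := by
  unfold find_options find_options_alt
  simp only [pvSearch_eq_filter _ num_cells target_sum h,
    PySem.List.foldl_append_eq_flatten, List.nil_append]
  simp

-- ===== VERDICT (by name: the statement is the Claim_ definition above) =====
theorem find_options_spec : Claim_equal_find_options := by
  intro t n _ hp
  exact find_options_eq t n hp
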